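-- pv_equiv track=rewrite | github.com/fafl/codejam2019 | round1A/alien_rhyme/alien_rhyme.py | solve
-- ===== SOURCE A (Python) =====
-- def count_overlapping_pairs(node):
--     visit_counter, children = node
--     child_counters = sum(count_overlapping_pairs(c) for c in children.values())
--     pairs_from_this = 0 if visit_counter - child_counters < 2 else 2
--     return pairs_from_this + child_counters
--
-- def solve(words):
--     words = [list(reversed(w)) for w in words]
--
--     trie = {}
--     for word in words:
--         node = trie
--         for c in word:
--             if c not in node:
--                 node[c] = [0, {}]   # counter and children
--             node[c][0] += 1
--             node = node[c][1]
--
--     return sum(count_overlapping_pairs(node) for node in trie.values())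
-- ===== SOURCE B (Python) =====
-- def solve(words):
--     def rec(block):
--         seen = []
--         for w in block:
--             if w and w[0] not in seen:
--                 seen.append(w[0])
--         total = 0
--         for c in seen:
--             g = [w[1:] for w in block if w and w[0] == c]
--             sub = rec(g)
--             total += sub + (2 if len(g) - sub >= 2 else 0)
--         return total
--     return rec([list(reversed(w)) for w in words])
-- ===== Notes on version B (the rewrite author's own statement) =====
-- stated objective: alternative
-- what changed: Replaces the mutable counter-trie (nested dicts built word by word, then a recursive sum over nodes) by a direct divide-and-conquer recursion that partitions the list of reversed words by first character, with no trie and no counters.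
import Mathlib
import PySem

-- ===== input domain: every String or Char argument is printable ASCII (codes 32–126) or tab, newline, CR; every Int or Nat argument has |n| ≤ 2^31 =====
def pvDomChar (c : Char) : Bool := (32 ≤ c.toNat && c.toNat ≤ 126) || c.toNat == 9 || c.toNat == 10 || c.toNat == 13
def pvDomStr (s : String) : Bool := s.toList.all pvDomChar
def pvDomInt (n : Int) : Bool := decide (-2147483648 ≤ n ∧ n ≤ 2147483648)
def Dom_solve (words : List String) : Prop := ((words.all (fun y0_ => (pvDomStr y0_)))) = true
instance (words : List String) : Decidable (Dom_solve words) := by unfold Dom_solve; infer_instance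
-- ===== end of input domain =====

-- B replaces A's mutable counter-trie by a direct recursion partitioning the reversed
-- words by first character (objective: alternative decomposition, no trie built).

-- ===== PORT A =====
-- Python's nested dict trie `{c: [counter, children]}`, in insertion order:
-- each entry carries its key, its counter, its children map, and the rest of the dict.
inductive TrieMap : Type
  | nil : TrieMap
  | cons : Char → Int → TrieMap → TrieMap → TrieMap

-- the inner `for c in word` loop of A: descend/update in place, threaded functionally
def insertWord : TrieMap → List Char → TrieMap
  | m, [] => m
  | .nil, c :: cs => .cons c 1 (insertWord .nil cs) .nil
  | .cons k cnt ch rest, c :: cs =>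
    if k = c then .cons k (cnt + 1) (insertWord ch cs) rest
    else .cons k cnt ch (insertWord rest (c :: cs))
termination_by m cs => (cs.length, sizeOf m)

mutual
-- count_overlapping_pairs(node) for node = (cnt, ch)
def cop (cnt : Int) (ch : TrieMap) : Int :=
  let child := copMap ch
  (if cnt - child < 2 then 0 else 2) + child
-- sum(count_overlapping_pairs(c) for c in children.values())
def copMap : TrieMap → Int
  | .nil => 0
  | .cons _ cnt ch rest => cop cnt ch + copMap rest
end

def solve (words : List String) : Int :=
  copMap ((words.map (fun w => w.toList.reverse)).foldl insertWord .nil)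

-- ===== PORT B =====
-- seen = first-occurrence list of first characters of the nonempty words
def headSeen (block : List (List Char)) : List Char :=
  block.foldl (fun s w =>
    match w with
    | [] => s
    | c :: _ => if c ∈ s then s else s ++ [c]) []

-- g = [w[1:] for w in block if w and w[0] == c]
def group (c : Char) (block : List (List Char)) : List (List Char) :=
  block.filterMap (fun w =>
    match w with
    | [] => none
    | c' :: rest => if c' = c then some rest else none)

def totalLen (block : List (List Char)) : Nat := (block.map List.length).sum

theorem group_nil_cons (c : Char) (bs : List (List Char)) :
    group c ([] :: bs) = group c bs := by simp [group]

theorem group_pos_cons (c : Char) (r : List Char) (bs : List (List Char)) :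
    group c ((c :: r) :: bs) = r :: group c bs := by simp [group]

theorem group_neg_cons (c c' : Char) (h : ¬ c' = c) (r : List Char) (bs : List (List Char)) :
    group c ((c' :: r) :: bs) = group c bs := by simp [group, h]

theorem totalLen_cons (w : List Char) (bs : List (List Char)) :
    totalLen (w :: bs) = w.length + totalLen bs := by simp [totalLen]

theorem group_totalLen_le (c : Char) (b : List (List Char)) :
    totalLen (group c b) ≤ totalLen b := by
  induction b with
  | nil => simp [group, totalLen]
  | cons w bs ih =>
    cases w with
    | nil => simpa [group_nil_cons, totalLen_cons] using ih
    | cons c' r =>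
      by_cases hcc : c' = c
      · subst hcc
        rw [group_pos_cons, totalLen_cons, totalLen_cons]
        simp only [List.length_cons]
        omega
      · rw [group_neg_cons c c' hcc, totalLen_cons]
        omega

theorem mem_headSeen (c : Char) (block : List (List Char))
    (hc : c ∈ headSeen block) : ∃ rest, (c :: rest) ∈ block := by
  have gen : ∀ (b : List (List Char)) (s : List Char),
      c ∈ b.foldl (fun s w =>
        match w with
        | [] => s
        | c :: _ => if c ∈ s then s else s ++ [c]) s →
      c ∈ s ∨ ∃ rest, (c :: rest) ∈ b := by
    intro b
    induction b with
    | nil => intro s h; exact Or.inl h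
    | cons w bs ih =>
      intro s h
      cases w with
      | nil =>
        rcases ih _ h with h' | ⟨rest, hr⟩
        · exact Or.inl h'
        · exact Or.inr ⟨rest, List.mem_cons_of_mem _ hr⟩
      | cons c' r =>
        rcases ih _ h with h' | ⟨rest, hr⟩
        · by_cases hcs : c' ∈ s
          · simp only [hcs, if_pos] at h'; exact Or.inl h'
          · simp only [hcs, if_neg, not_false_iff, List.mem_append,
              List.mem_singleton] at h'
            rcases h' with h' | h'
            · exact Or.inl h'
            · exact Or.inr ⟨r, by simp [h']⟩
        · exact Or.inr ⟨rest, List.mem_cons_of_mem _ hr⟩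
  rcases gen block [] hc with h | h
  · cases h
  · exact h

theorem group_totalLen_lt (c : Char) (block : List (List Char))
    (hc : c ∈ headSeen block) : totalLen (group c block) < totalLen block := by
  obtain ⟨rest, hmem⟩ := mem_headSeen c block hc
  clear hc
  induction block with
  | nil => cases hmem
  | cons w bs ih =>
    rcases List.mem_cons.mp hmem with h | h
    · subst h
      have := group_totalLen_le c bs
      rw [group_pos_cons, totalLen_cons, totalLen_cons]
      simp only [List.length_cons]
      omega
    · have hlt := ih h
      cases w with
      | nil =>
        rw [group_nil_cons, totalLen_cons]
        omega
      | cons c' r =>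
        by_cases hcc : c' = c
        · subst hcc
          rw [group_pos_cons, totalLen_cons, totalLen_cons]
          simp only [List.length_cons]
          omega
        · rw [group_neg_cons c c' hcc, totalLen_cons]
          omega

-- the body of B's rec
def recB (block : List (List Char)) : Int :=
  (headSeen block).attach.foldl (fun total c =>
    let g := group c.1 block
    let sub := recB g
    total + (sub + (if (g.length : Int) - sub ≥ 2 then 2 else 0))) 0
termination_by totalLen block
decreasing_by exact group_totalLen_lt c.1 block c.2

def solve_alt (words : List String) : Int :=
  recB (words.map (fun w => w.toList.reverse))

-- ===== PRECONDITION & SPEC =====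
def Spec_solve (words : List String) (out : Int) : Prop := out = solve_alt words
instance (words : List String) (out : Int) : Decidable (Spec_solve words out) := by unfold Spec_solve; infer_instance

-- ===== CLAIM (what is proved, stated in full; the proofs are below) =====
def Claim_equal_solve : Prop := ∀ (words : List String), Dom_solve words → Spec_solve words (solve words)

-- ===== LEMMAS AND PROOFS =====

def tmFind? : TrieMap → Char → Option (Int × TrieMap)
  | .nil, _ => none
  | .cons k cnt ch rest, c => if k = c then some (cnt, ch) else tmFind? rest c

def tmKeys : TrieMap → List Char
  | .nil => []
  | .cons k _ _ rest => k :: tmKeys rest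

def nodeOf (m : TrieMap) (c : Char) : Int × TrieMap :=
  match tmFind? m c with
  | none => (0, .nil)
  | some p => p

theorem insertWord_nil_word (m : TrieMap) : insertWord m [] = m := by
  cases m <;> simp [insertWord]

theorem tmKeys_insertWord (m : TrieMap) (c : Char) (cs : List Char) :
    tmKeys (insertWord m (c :: cs)) =
      if c ∈ tmKeys m then tmKeys m else tmKeys m ++ [c] := by
  induction m with
  | nil => simp [insertWord, tmKeys]
  | cons k cnt ch rest ihch ihrest =>
    by_cases hk : k = c
    · subst hk; simp [insertWord, tmKeys]
    · simp only [insertWord, hk, if_neg, not_false_iff, tmKeys, ihrest,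
        List.mem_cons, Ne.symm hk, false_or]
      split <;> simp

theorem tmFind?_insertWord_self (m : TrieMap) (c : Char) (cs : List Char) :
    tmFind? (insertWord m (c :: cs)) c =
      some ((nodeOf m c).1 + 1, insertWord (nodeOf m c).2 cs) := by
  induction m with
  | nil => simp [insertWord, tmFind?, nodeOf]
  | cons k cnt ch rest ihch ihrest =>
    by_cases hk : k = c
    · subst hk; simp [insertWord, tmFind?, nodeOf]
    · simp [insertWord, hk, tmFind?, nodeOf, ihrest]

theorem tmFind?_insertWord_other (m : TrieMap) (c k : Char) (cs : List Char)
    (hk : k ≠ c) : tmFind? (insertWord m (c :: cs)) k = tmFind? m k := by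
  induction m with
  | nil => simp [insertWord, tmFind?, Ne.symm hk]
  | cons k' cnt ch rest ihch ihrest =>
    by_cases hk' : k' = c
    · subst hk'; simp [insertWord, tmFind?, Ne.symm hk]
    · simp [insertWord, hk', tmFind?, ihrest]

theorem nodeOf_foldl (ws : List (List Char)) :
    ∀ (m : TrieMap) (c : Char),
      nodeOf (ws.foldl insertWord m) c =
        ((nodeOf m c).1 + ((group c ws).length : Int),
          (group c ws).foldl insertWord (nodeOf m c).2) := by
  induction ws with
  | nil => intro m c; simp [group]
  | cons w rest ih =>
    intro m c
    cases w with
    | nil =>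
      simp only [List.foldl_cons, insertWord_nil_word]
      rw [ih, group_nil_cons]
    | cons c' cs =>
      by_cases hc : c' = c
      · subst hc
        simp only [List.foldl_cons]
        rw [ih]
        have hn : nodeOf (insertWord m (c' :: cs)) c' =
            ((nodeOf m c').1 + 1, insertWord (nodeOf m c').2 cs) := by
          simp [nodeOf, tmFind?_insertWord_self]
        rw [hn]
        rw [group_pos_cons]
        simp only [List.length_cons, List.foldl_cons, Prod.mk.injEq]
        refine ⟨by push_cast; omega, trivial⟩
      · simp only [List.foldl_cons]
        rw [ih]
        have hn : nodeOf (insertWord m (c' :: cs)) c = nodeOf m c := by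
          simp [nodeOf, tmFind?_insertWord_other m c' c cs (Ne.symm hc)]
        rw [hn, group_neg_cons c c' hc]

theorem tmKeys_foldl (ws : List (List Char)) :
    ∀ (m : TrieMap),
      tmKeys (ws.foldl insertWord m) =
        ws.foldl (fun s w =>
          match w with
          | [] => s
          | c :: _ => if c ∈ s then s else s ++ [c]) (tmKeys m) := by
  induction ws with
  | nil => intro m; rfl
  | cons w rest ih =>
    intro m
    cases w with
    | nil => simp only [List.foldl_cons, insertWord_nil_word]; exact ih m
    | cons c cs =>
      simp only [List.foldl_cons]
      rw [ih, tmKeys_insertWord]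

theorem nodup_tmKeys_insertWord (m : TrieMap) (w : List Char)
    (h : (tmKeys m).Nodup) : (tmKeys (insertWord m w)).Nodup := by
  cases w with
  | nil => rwa [insertWord_nil_word]
  | cons c cs =>
    rw [tmKeys_insertWord]
    split
    · exact h
    · next hne => exact List.Nodup.append h (List.nodup_singleton c) (by simpa using hne)

theorem nodup_tmKeys_foldl (ws : List (List Char)) :
    ∀ (m : TrieMap), (tmKeys m).Nodup → (tmKeys (ws.foldl insertWord m)).Nodup := by
  induction ws with
  | nil => intro m h; exact h
  | cons w rest ih =>
    intro m h
    exact ih _ (nodup_tmKeys_insertWord m w h)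

theorem copMap_eq_sum_keys (m : TrieMap) (h : (tmKeys m).Nodup) :
    copMap m = ((tmKeys m).map
      (fun k => cop (nodeOf m k).1 (nodeOf m k).2)).sum := by
  induction m with
  | nil => simp [copMap, tmKeys]
  | cons k cnt ch rest ihch ihrest =>
    simp only [tmKeys, List.nodup_cons] at h
    obtain ⟨hk, hrest⟩ := h
    have hself : nodeOf (TrieMap.cons k cnt ch rest) k = (cnt, ch) := by
      simp [nodeOf, tmFind?]
    have hcongr : ((tmKeys rest).map
        (fun k' => cop (nodeOf (TrieMap.cons k cnt ch rest) k').1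
          (nodeOf (TrieMap.cons k cnt ch rest) k').2)).sum =
        ((tmKeys rest).map
        (fun k' => cop (nodeOf rest k').1 (nodeOf rest k').2)).sum := by
      apply congrArg
      apply List.map_congr_left
      intro k' hk'
      have hne : k ≠ k' := fun he => hk (he ▸ hk')
      simp [nodeOf, tmFind?, hne]
    simp only [tmKeys, List.map_cons, List.sum_cons, hself, hcongr, copMap]
    rw [ihrest hrest]

theorem foldl_add_int {α : Type} (f : α → Int) (l : List α) :
    ∀ (a : Int), l.foldl (fun acc x => acc + f x) a = a + (l.map f).sum := by
  induction l with
  | nil => intro a; simp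
  | cons x xs ih => intro a; simp [ih]; ring

theorem attach_foldl_add {α : Type} (l : List α) (f : α → Int) (a : Int) :
    l.attach.foldl (fun acc x => acc + f x.1) a = a + (l.map f).sum := by
  rw [foldl_add_int (fun x : {y // y ∈ l} => f x.1) l.attach a]
  congr 1
  simp

theorem recB_eq_sum (block : List (List Char)) :
    recB block = ((headSeen block).map (fun c =>
      recB (group c block) +
        (if ((group c block).length : Int) - recB (group c block) ≥ 2 then 2 else 0))).sum := by
  rw [recB]
  have h := attach_foldl_add (headSeen block) (fun c => recB (group c block) +
      (if ((group c block).length : Int) - recB (group c block) ≥ 2 then 2 else 0)) 0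
  rw [zero_add] at h
  exact h

theorem copMap_build_eq_recB (block : List (List Char)) :
    copMap (block.foldl insertWord .nil) = recB block := by
  have hkeys : tmKeys (block.foldl insertWord .nil) = headSeen block := by
    rw [tmKeys_foldl]; rfl
  have hnodup : (tmKeys (block.foldl insertWord .nil)).Nodup :=
    nodup_tmKeys_foldl block .nil (by simp [tmKeys])
  rw [copMap_eq_sum_keys _ hnodup, hkeys, recB_eq_sum]
  apply congrArg
  apply List.map_congr_left
  intro c hc
  have hnode := nodeOf_foldl block TrieMap.nil c
  have hnil : nodeOf TrieMap.nil c = (0, .nil) := by simp [nodeOf, tmFind?]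
  rw [hnil] at hnode
  rw [hnode]
  have hsub : copMap ((group c block).foldl insertWord .nil) = recB (group c block) :=
    copMap_build_eq_recB (group c block)
  simp only [cop, hsub]
  split <;> split <;> omega
termination_by totalLen block
decreasing_by exact group_totalLen_lt c block hc

-- ===== VERDICT (by name: the statement is the Claim_ definition above) =====
theorem solve_spec : Claim_equal_solve := by
  intro words _
  unfold Spec_solve solve solve_alt
  exact copMap_build_eq_recB _
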